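-- pv_equiv track=rewrite | github.com/bashi-nobu/qumitoru | docker/lambda/ocr/predict/api/lib/reader.py | checkFalsePositive
-- ===== SOURCE A (Python) =====
-- def checkFalsePositive(points):
--     isError = False
--     p_lists = []
--     for p in points:
--         p_lists.append(int(p[0]))
--     for p in points:
--         if int(p[0]) > 200:
--             isError = True
--             break
--         for pl in p_lists:
--             if pl < int(p[1]) + 100 and pl > int(p[1]) - 100:
--                 isError = True
--                 break
--     return isError
-- ===== SOURCE B (Python) =====
-- def checkFalsePositive(points):
--     xs = sorted(int(p[0]) for p in points)
--     if xs and xs[-1] > 200: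
--         return True
--     for p in points:
--         y = int(p[1])
--         # leftmost index whose value is > y - 100 (hand-rolled bisect_right for y-100)
--         lo, hi = 0, len(xs)
--         while lo < hi:
--             mid = (lo + hi) // 2
--             if xs[mid] <= y - 100:
--                 lo = mid + 1
--             else:
--                 hi = mid
--         if lo < len(xs) and xs[lo] < y + 100:
--             return True
--     return False
-- ===== Notes on version B (the rewrite author's own statement) =====
-- stated objective: alternative
-- what changed: Replaces the nested all-pairs window scan with sorting the x-values once and, per row, a hand-rolled binary search for an x in the open window (y-100, y+100), plus a single last-element check for x>200.
-- outside the precondition, e.g. on checkFalsePositive([[300]]): A returns True, B returns True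
import Mathlib
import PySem

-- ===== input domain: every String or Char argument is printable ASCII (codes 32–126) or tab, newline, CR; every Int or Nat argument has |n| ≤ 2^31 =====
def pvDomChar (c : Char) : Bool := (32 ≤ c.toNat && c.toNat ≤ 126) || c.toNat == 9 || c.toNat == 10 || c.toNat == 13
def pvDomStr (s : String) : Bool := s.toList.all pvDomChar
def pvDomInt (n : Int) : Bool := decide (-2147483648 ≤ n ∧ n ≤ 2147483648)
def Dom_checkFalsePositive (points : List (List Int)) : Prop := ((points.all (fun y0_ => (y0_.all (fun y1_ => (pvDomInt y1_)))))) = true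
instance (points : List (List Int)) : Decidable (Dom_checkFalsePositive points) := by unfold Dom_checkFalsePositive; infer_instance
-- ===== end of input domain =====

-- B sorts the x-values once and binary-searches each row's y-window instead of A's
-- all-pairs scan; equivalence of the return values is proved on rows of length ≥ 2.

-- ===== PORT A =====
-- inner 'for pl in p_lists' loop with its break
def pvInnerA (y : Int) : List Int → Bool
  | [] => false
  | pl :: rest => if pl < y + 100 && pl > y - 100 then true else pvInnerA y rest

-- outer 'for p in points' loop; the inner break only sets isError, the outer continues
def pvOuterA (plists : List Int) (isError : Bool) : List (List Int) → Bool
  | [] => isError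
  | p :: rest =>
    if ((PySem.List.pyGet? p 0).getD 0) > 200 then true
    else pvOuterA plists (isError || pvInnerA ((PySem.List.pyGet? p 1).getD 0) plists) rest

def checkFalsePositive (points : List (List Int)) : Bool :=
  let plists := points.foldl (fun acc p => acc ++ [(PySem.List.pyGet? p 0).getD 0]) []
  pvOuterA plists false points

-- ===== PORT B =====
-- hand-rolled binary search of Source B: leftmost index whose value exceeds t
def pvBisect (xs : List Int) (t : Int) (lo hi : Nat) : Nat :=
  if h : lo < hi then
    let mid := (lo + hi) / 2
    if PySem.List.pyGetD xs (mid : Int) 0 ≤ t then pvBisect xs t (mid + 1) hi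
    else pvBisect xs t lo mid
  else lo
termination_by hi - lo
decreasing_by all_goals omega

-- 'for p in points' loop of Source B with its early return
def pvLoopB (xs : List Int) : List (List Int) → Bool
  | [] => false
  | p :: rest =>
    let y := (PySem.List.pyGet? p 1).getD 0
    let lo := pvBisect xs (y - 100) 0 xs.length
    if lo < xs.length && PySem.List.pyGetD xs (lo : Int) 0 < y + 100 then true
    else pvLoopB xs rest

def checkFalsePositive_alt (points : List (List Int)) : Bool :=
  let xs := PySem.List.sorted (points.map (fun p => (PySem.List.pyGet? p 0).getD 0)) (fun x => x) false
  if !xs.isEmpty && PySem.List.pyGetD xs (-1) 0 > 200 then true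
  else pvLoopB xs points

-- ===== PRECONDITION & SPEC =====
-- Pre_ excludes rows with fewer than 2 entries: on those A raises IndexError, except when an
-- x-value > 200 lets it return True before reading the missing y — and then B returns True too.
def Pre_checkFalsePositive (points : List (List Int)) : Prop :=
  ∀ p ∈ points, 2 ≤ p.length
instance (points : List (List Int)) : Decidable (Pre_checkFalsePositive points) := by unfold Pre_checkFalsePositive; infer_instance
def pvWitness_checkFalsePositive : List (List Int) := [[0, 250], [150, -20]]

def Spec_checkFalsePositive (points : List (List Int)) (out : Bool) : Prop := out = checkFalsePositive_alt points
instance (points : List (List Int)) (out : Bool) : Decidable (Spec_checkFalsePositive points out) := by unfold Spec_checkFalsePositive; infer_instance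

-- ===== CLAIM (what is proved, stated in full; the proofs are below) =====
def Claim_equal_checkFalsePositive : Prop := ∀ (points : List (List Int)), Dom_checkFalsePositive points → Pre_checkFalsePositive points → Spec_checkFalsePositive points (checkFalsePositive points)

-- ===== LEMMAS AND PROOFS =====

theorem pvInnerA_any (y : Int) (l : List Int) :
    pvInnerA y l = l.any (fun pl => pl < y + 100 && pl > y - 100) := by
  induction l with
  | nil => rfl
  | cons a l ih => by_cases h : (a < y + 100 && a > y - 100) = true <;>
      simp [pvInnerA, ih, h]

theorem pvOuterA_any (plists : List Int) (b : Bool) (l : List (List Int)) :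
    pvOuterA plists b l
      = (b || l.any (fun p =>
          decide (((PySem.List.pyGet? p 0).getD 0) > 200)
          || pvInnerA ((PySem.List.pyGet? p 1).getD 0) plists)) := by
  induction l generalizing b with
  | nil => simp [pvOuterA]
  | cons p l ih =>
    simp only [pvOuterA, List.any_cons]
    split_ifs with h
    · simp [h]
    · rw [ih]; simp [h]; cases b <;> simp

theorem pvLoopB_iff (xs : List Int) (l : List (List Int)) :
    pvLoopB xs l = true ↔ ∃ p ∈ l,
      pvBisect xs ((PySem.List.pyGet? p 1).getD 0 - 100) 0 xs.length < xs.length ∧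
      PySem.List.pyGetD xs ((pvBisect xs ((PySem.List.pyGet? p 1).getD 0 - 100) 0 xs.length : Nat) : Int) 0
        < (PySem.List.pyGet? p 1).getD 0 + 100 := by
  induction l with
  | nil => simp [pvLoopB]
  | cons p l ih =>
    simp only [pvLoopB]
    split_ifs with h
    · rw [Bool.and_eq_true, decide_eq_true_eq, decide_eq_true_eq] at h
      exact iff_of_true rfl ⟨p, List.mem_cons_self, h.1, h.2⟩
    · rw [ih]
      constructor
      · rintro ⟨q, hq, hh⟩; exact ⟨q, List.mem_cons_of_mem _ hq, hh⟩
      · rintro ⟨q, hq, hh⟩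
        rcases List.mem_cons.mp hq with rfl | hq'
        · exact absurd (by simp only [Bool.and_eq_true, decide_eq_true_eq]; exact hh) h
        · exact ⟨q, hq', hh⟩

theorem pvBisect_spec (xs : List Int) (t : Int) (hsort : xs.Pairwise (· ≤ ·)) :
    ∀ (n lo hi : Nat), hi - lo ≤ n → lo ≤ hi → hi ≤ xs.length →
    (∀ i (h : i < xs.length), i < lo → xs[i] ≤ t) →
    (∀ i (h : i < xs.length), hi ≤ i → t < xs[i]) →
    lo ≤ pvBisect xs t lo hi ∧ pvBisect xs t lo hi ≤ hi ∧
    (∀ i (h : i < xs.length), i < pvBisect xs t lo hi → xs[i] ≤ t) ∧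
    (∀ i (h : i < xs.length), pvBisect xs t lo hi ≤ i → t < xs[i]) := by
  intro n
  induction n with
  | zero =>
    intro lo hi h1 h2 hhi hlow hhigh
    have h : ¬ lo < hi := by omega
    rw [pvBisect]; simp only [dif_neg h]
    exact ⟨le_rfl, h2, hlow, fun i hi' hge => hhigh i hi' (by omega)⟩
  | succ n ih =>
    intro lo hi h1 h2 hhi hlow hhigh
    by_cases h : lo < hi
    · rw [pvBisect]; simp only [dif_pos h]
      have hmlen : (lo + hi) / 2 < xs.length := by omega
      have hget : PySem.List.pyGetD xs (((lo + hi) / 2 : Nat) : Int) 0 = xs[(lo + hi) / 2] := by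
        rw [PySem.List.pyGetD_natCast]
        simp [List.getD_eq_getElem?_getD, hmlen]
      split_ifs with hle
      · rw [hget] at hle
        have res := ih ((lo + hi) / 2 + 1) hi (by omega) (by omega) hhi
          (fun i hi' hlt => by
            rcases Nat.lt_or_ge i ((lo + hi) / 2) with hc | hc
            · rcases Nat.lt_or_ge i lo with hc2 | hc2
              · exact hlow i hi' hc2
              · calc xs[i] ≤ xs[(lo+hi)/2] :=
                      List.pairwise_iff_getElem.mp hsort i _ hi' hmlen hc
                  _ ≤ t := hle
            · have : i = (lo + hi) / 2 := by omega
              subst this; exact hle)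
          hhigh
        exact ⟨by omega, res.2.1, res.2.2.1, res.2.2.2⟩
      · rw [hget] at hle
        have res := ih lo ((lo + hi) / 2) (by omega) (by omega) (by omega) hlow
          (fun i hi' hge => by
            rcases Nat.lt_or_ge ((lo + hi) / 2) i with hc | hc
            · have : xs[(lo+hi)/2] ≤ xs[i] := List.pairwise_iff_getElem.mp hsort _ i hmlen hi' hc
              omega
            · have : i = (lo + hi) / 2 := by omega
              subst this; omega)
        exact ⟨res.1, by omega, res.2.2.1, res.2.2.2⟩
    · rw [pvBisect]; simp only [dif_neg h]
      exact ⟨le_rfl, h2, hlow, fun i hi' hge => hhigh i hi' (by omega)⟩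

-- per-row agreement: the binary-search window test equals membership in the open interval
theorem pvBisect_window (xs : List Int) (hsort : xs.Pairwise (· ≤ ·)) (t u : Int) :
    (pvBisect xs t 0 xs.length < xs.length ∧
      PySem.List.pyGetD xs ((pvBisect xs t 0 xs.length : Nat) : Int) 0 < u)
    ↔ ∃ x ∈ xs, t < x ∧ x < u := by
  obtain ⟨-, hle, hlow, hhigh⟩ := pvBisect_spec xs t hsort xs.length 0 xs.length (by omega)
    (Nat.zero_le _) le_rfl (fun i h hlt => by omega) (fun i h hge => by omega)
  set r := pvBisect xs t 0 xs.length with hr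
  constructor
  · rintro ⟨hrl, hru⟩
    have hget : PySem.List.pyGetD xs ((r : Nat) : Int) 0 = xs[r] := by
      simp [PySem.List.pyGetD_natCast, List.getD_eq_getElem?_getD, hrl]
    exact ⟨xs[r], List.getElem_mem hrl, hhigh r hrl le_rfl, by rwa [hget] at hru⟩
  · rintro ⟨x, hx, ht, hu⟩
    obtain ⟨j, hj, rfl⟩ := List.getElem_of_mem hx
    have hrj : r ≤ j := by
      by_contra hc
      exact absurd (hlow j hj (by omega)) (by omega)
    have hrl : r < xs.length := by omega
    have hget : PySem.List.pyGetD xs ((r : Nat) : Int) 0 = xs[r] := by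
      simp [PySem.List.pyGetD_natCast, List.getD_eq_getElem?_getD, hrl]
    refine ⟨hrl, ?_⟩
    rw [hget]
    rcases Nat.lt_or_ge r j with hc | hc
    · have := List.pairwise_iff_getElem.mp hsort r j hrl hj hc
      omega
    · have : r = j := by omega
      subst this; omega

-- sorted nonempty list: last element > 200 iff some element is
theorem pvLast_gt (xs : List Int) (hsort : xs.Pairwise (· ≤ ·)) (hne : xs ≠ []) :
    (PySem.List.pyGetD xs (-1) 0 > 200) ↔ ∃ x ∈ xs, x > 200 := by
  rw [PySem.List.pyGetD_neg_one xs 0 hne]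
  constructor
  · intro h; exact ⟨xs.getLast hne, List.getLast_mem hne, h⟩
  · rintro ⟨x, hx, hgt⟩
    have : x ≤ xs.getLast hne := by
      obtain ⟨j, hj, rfl⟩ := List.getElem_of_mem hx
      rw [List.getLast_eq_getElem]
      rcases Nat.lt_or_ge j (xs.length - 1) with hc | hc
      · exact List.pairwise_iff_getElem.mp hsort j (xs.length - 1) hj (by omega) hc
      · have : j = xs.length - 1 := by omega
        subst this; exact le_rfl
    omega

-- A's loops, characterised
theorem A_iff (points : List (List Int)) :
    checkFalsePositive points = true ↔
      (∃ p ∈ points, (PySem.List.pyGet? p 0).getD 0 > 200) ∨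
      (∃ p ∈ points, ∃ pl ∈ points.map (fun q => (PySem.List.pyGet? q 0).getD 0),
        pl < (PySem.List.pyGet? p 1).getD 0 + 100 ∧ pl > (PySem.List.pyGet? p 1).getD 0 - 100) := by
  unfold checkFalsePositive
  rw [PySem.List.foldl_append_singleton_eq_map, List.nil_append, pvOuterA_any]
  simp only [Bool.false_or, List.any_eq_true, Bool.or_eq_true, decide_eq_true_eq, pvInnerA_any,
    Bool.and_eq_true]
  constructor
  · rintro ⟨p, hp, hgt | hwin⟩
    · exact Or.inl ⟨p, hp, hgt⟩
    · exact Or.inr ⟨p, hp, hwin⟩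
  · rintro (⟨p, hp, hgt⟩ | ⟨p, hp, pl, hpl, h1, h2⟩)
    · exact ⟨p, hp, Or.inl hgt⟩
    · exact ⟨p, hp, Or.inr ⟨pl, hpl, h1, h2⟩⟩

-- B's sort + binary search, characterised by the same formula
theorem B_iff (points : List (List Int)) :
    checkFalsePositive_alt points = true ↔
      (∃ p ∈ points, (PySem.List.pyGet? p 0).getD 0 > 200) ∨
      (∃ p ∈ points, ∃ pl ∈ points.map (fun q => (PySem.List.pyGet? q 0).getD 0),
        pl < (PySem.List.pyGet? p 1).getD 0 + 100 ∧ pl > (PySem.List.pyGet? p 1).getD 0 - 100) := by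
  unfold checkFalsePositive_alt
  set plists := points.map (fun q => (PySem.List.pyGet? q 0).getD 0) with hpl
  set xs := PySem.List.sorted plists (fun x => x) false with hxs
  have hsort : xs.Pairwise (· ≤ ·) := PySem.List.sorted_pairwise plists (fun x => x)
  have hmem : ∀ x, x ∈ xs ↔ x ∈ plists := fun x =>
    PySem.List.mem_sorted plists (fun x => x) false x
  have hmax : (∃ x ∈ xs, x > 200) ↔ ∃ p ∈ points, (PySem.List.pyGet? p 0).getD 0 > 200 := by
    constructor
    · rintro ⟨x, hx, hgt⟩
      obtain ⟨p, hp, rfl⟩ := List.mem_map.mp ((hmem x).mp hx)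
      exact ⟨p, hp, hgt⟩
    · rintro ⟨p, hp, hgt⟩
      exact ⟨_, (hmem _).mpr (List.mem_map_of_mem hp), hgt⟩
  show (if (!xs.isEmpty && decide (PySem.List.pyGetD xs (-1) 0 > 200)) = true
      then true else pvLoopB xs points) = true ↔ _
  split_ifs with h
  · rw [Bool.and_eq_true, Bool.not_eq_eq_eq_not, Bool.not_true, List.isEmpty_eq_false_iff,
      decide_eq_true_eq] at h
    exact iff_of_true rfl (Or.inl (hmax.mp ((pvLast_gt xs hsort h.1).mp h.2)))
  · rw [pvLoopB_iff]
    have hno : ¬ ∃ x ∈ xs, x > 200 := by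
      rintro ⟨x, hx, hgt⟩
      have hne : xs ≠ [] := by intro he; rw [he] at hx; simp at hx
      exact h (by simp only [Bool.and_eq_true, Bool.not_eq_eq_eq_not, Bool.not_true,
        List.isEmpty_eq_false_iff, decide_eq_true_eq]; exact ⟨hne, (pvLast_gt xs hsort hne).mpr ⟨x, hx, hgt⟩⟩)
    constructor
    · rintro ⟨p, hp, hwin⟩
      obtain ⟨x, hx, ht, hu⟩ := (pvBisect_window xs hsort _ _).mp hwin
      exact Or.inr ⟨p, hp, x, (hmem x).mp hx, hu, by omega⟩
    · rintro (hgt | ⟨p, hp, pl, hplm, h1, h2⟩)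
      · exact absurd (hmax.mpr hgt) hno
      · exact ⟨p, hp, (pvBisect_window xs hsort _ _).mpr ⟨pl, (hmem pl).mpr hplm, by omega, h1⟩⟩

-- ===== VERDICT (by name: the statement is the Claim_ definition above) =====
theorem checkFalsePositive_spec : Claim_equal_checkFalsePositive := by
  intro points _ _
  unfold Spec_checkFalsePositive
  rw [Bool.eq_iff_iff, A_iff, B_iff]
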